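-- pv_equiv track=rewrite | github.com/OneofGods/Loly | bundesliga_legendary_algorithm.py | _get_stronger_bundesliga_team
-- ===== SOURCE A (Python) =====
-- def _get_stronger_bundesliga_team(home_team: str, away_team: str) -> str:
--     """Determine stronger team based on Bundesliga hierarchy"""
--     title_contenders = ['BAYERN MUNICH', 'BAYERN MUNCHEN', 'FC BAYERN']
--     big_teams = ['BORUSSIA DORTMUND', 'RB LEIPZIG', 'BAYER LEVERKUSEN', 'EINTRACHT FRANKFURT']
--
--     home_title = any(team in home_team.upper() for team in title_contenders)
--     away_title = any(team in away_team.upper() for team in title_contenders)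
--     home_big = any(team in home_team.upper() for team in big_teams)
--     away_big = any(team in away_team.upper() for team in big_teams)
--
--     if home_title and not away_title:
--         return home_team
--     elif away_title and not home_title:
--         return away_team
--     elif home_big and not away_big:
--         return home_team
--     elif away_big and not home_big:
--         return away_team
--     else:
--         # Similar level - prefer home
--         return home_team
-- ===== SOURCE B (Python) =====
-- def _get_stronger_bundesliga_team(home_team: str, away_team: str) -> str:
--     """Determine stronger team based on Bundesliga hierarchy (scored comparison)."""
--     title_contenders = ['BAYERN MUNICH', 'BAYERN MUNCHEN', 'FC BAYERN']
--     big_teams = ['BORUSSIA DORTMUND', 'RB LEIPZIG', 'BAYER LEVERKUSEN', 'EINTRACHT FRANKFURT']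
--
--     def strength(team):
--         u = team.upper()
--         return 2 * any(t in u for t in title_contenders) + any(t in u for t in big_teams)
--
--     return home_team if strength(home_team) >= strength(away_team) else away_team
-- ===== Notes on version B (the rewrite author's own statement) =====
-- stated objective: simpler
-- what changed: Replaces the five-way if/elif cascade over four boolean flags by a single numeric strength score (2*title_contender + big_team) per team, uppercasing each team once instead of twice, and one >= comparison that prefers home on ties.
import Mathlib
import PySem

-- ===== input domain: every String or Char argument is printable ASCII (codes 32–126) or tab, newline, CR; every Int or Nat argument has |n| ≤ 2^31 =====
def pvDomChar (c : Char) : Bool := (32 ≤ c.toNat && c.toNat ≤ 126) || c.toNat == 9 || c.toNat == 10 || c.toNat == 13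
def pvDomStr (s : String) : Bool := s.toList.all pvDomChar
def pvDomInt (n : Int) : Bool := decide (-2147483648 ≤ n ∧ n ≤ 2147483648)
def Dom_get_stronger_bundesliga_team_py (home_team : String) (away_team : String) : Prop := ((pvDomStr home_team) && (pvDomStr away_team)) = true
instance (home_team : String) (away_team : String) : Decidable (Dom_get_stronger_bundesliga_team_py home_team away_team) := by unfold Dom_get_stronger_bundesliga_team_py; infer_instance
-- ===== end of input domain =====

-- ===== PORT A =====
def get_stronger_bundesliga_team_py (home_team : String) (away_team : String) : String :=
  let title_contenders : List String := ["BAYERN MUNICH", "BAYERN MUNCHEN", "FC BAYERN"]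
  let big_teams : List String := ["BORUSSIA DORTMUND", "RB LEIPZIG", "BAYER LEVERKUSEN", "EINTRACHT FRANKFURT"]
  let home_title := title_contenders.any (fun team => PySem.Str.isIn team (PySem.Str.upper home_team))
  let away_title := title_contenders.any (fun team => PySem.Str.isIn team (PySem.Str.upper away_team))
  let home_big := big_teams.any (fun team => PySem.Str.isIn team (PySem.Str.upper home_team))
  let away_big := big_teams.any (fun team => PySem.Str.isIn team (PySem.Str.upper away_team))
  if home_title && !away_title then home_team
  else if away_title && !home_title then away_team
  else if home_big && !away_big then home_team
  else if away_big && !home_big then away_team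
  else home_team

-- ===== PORT B =====
-- B: one strength score per team (2*title + big) and a single >= comparison, replacing the if/elif cascade; objective: simpler.
-- strength of one team: uppercase once, score 2*title + big
def pvStrength (team : String) : Int :=
  let u := PySem.Str.upper team
  2 * (if (["BAYERN MUNICH", "BAYERN MUNCHEN", "FC BAYERN"] : List String).any (fun t => PySem.Str.isIn t u) then 1 else 0)
    + (if (["BORUSSIA DORTMUND", "RB LEIPZIG", "BAYER LEVERKUSEN", "EINTRACHT FRANKFURT"] : List String).any (fun t => PySem.Str.isIn t u) then 1 else 0)

def get_stronger_bundesliga_team_py_alt (home_team : String) (away_team : String) : String :=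
  if pvStrength home_team ≥ pvStrength away_team then home_team else away_team

-- ===== PRECONDITION & SPEC =====
def Spec_get_stronger_bundesliga_team_py (home_team : String) (away_team : String) (out : String) : Prop := out = get_stronger_bundesliga_team_py_alt home_team away_team
instance (home_team : String) (away_team : String) (out : String) : Decidable (Spec_get_stronger_bundesliga_team_py home_team away_team out) := by unfold Spec_get_stronger_bundesliga_team_py; infer_instance

-- ===== CLAIM (what is proved, stated in full; the proofs are below) =====
def Claim_equal_get_stronger_bundesliga_team_py : Prop := ∀ (home_team : String) (away_team : String), Dom_get_stronger_bundesliga_team_py home_team away_team → Spec_get_stronger_bundesliga_team_py home_team away_team (get_stronger_bundesliga_team_py home_team away_team)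

-- ===== LEMMAS AND PROOFS =====

-- ===== VERDICT (by name: the statement is the Claim_ definition above) =====
lemma pvScoreCase (h a : String) (ht at_ hb ab : Bool) :
    (if ht && !at_ then h else if at_ && !ht then a
     else if hb && !ab then h else if ab && !hb then a else h)
    = (if 2 * (if ht then (1:Int) else 0) + (if hb then (1:Int) else 0)
          ≥ 2 * (if at_ then (1:Int) else 0) + (if ab then (1:Int) else 0) then h else a) := by
  cases ht <;> cases at_ <;> cases hb <;> cases ab <;> simp

theorem get_stronger_bundesliga_team_py_spec : Claim_equal_get_stronger_bundesliga_team_py := by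
  intro home_team away_team _
  unfold Spec_get_stronger_bundesliga_team_py
  unfold get_stronger_bundesliga_team_py get_stronger_bundesliga_team_py_alt pvStrength
  exact pvScoreCase home_team away_team _ _ _ _
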